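-- pv_equiv track=rewrite | github.com/Kyrie11/acs_planner | planner/runtime/route_builder.py | _build_route_lane_graph
-- ===== SOURCE A (Python) =====
-- from typing import Any, Dict, Iterable, List, Optional
--
-- def _build_route_lane_graph(route_roadblock_ids: List[str]) -> Dict[str, List[str]]:
--     graph: Dict[str, List[str]] = {}
--     for idx, rid in enumerate(route_roadblock_ids):
--         if idx + 1 < len(route_roadblock_ids):
--             graph.setdefault(rid, []).append(route_roadblock_ids[idx + 1])
--         else:
--             graph.setdefault(rid, [])
--     return graph
-- ===== SOURCE B (Python) =====
-- from typing import Dict, List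
--
--
-- def _build_route_lane_graph(route_roadblock_ids: List[str]) -> Dict[str, List[str]]:
--     pairs = list(zip(route_roadblock_ids, route_roadblock_ids[1:]))
--     return {rid: [b for a, b in pairs if a == rid]
--             for rid in dict.fromkeys(route_roadblock_ids)}
-- ===== Notes on version B (the rewrite author's own statement) =====
-- stated objective: alternative
-- what changed: Instead of one dict-building pass with setdefault/append, B deduplicates the ids (first-occurrence order) and for each distinct id filters the list of adjacent pairs to collect its successors, a per-key nested scan.
import Mathlib
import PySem

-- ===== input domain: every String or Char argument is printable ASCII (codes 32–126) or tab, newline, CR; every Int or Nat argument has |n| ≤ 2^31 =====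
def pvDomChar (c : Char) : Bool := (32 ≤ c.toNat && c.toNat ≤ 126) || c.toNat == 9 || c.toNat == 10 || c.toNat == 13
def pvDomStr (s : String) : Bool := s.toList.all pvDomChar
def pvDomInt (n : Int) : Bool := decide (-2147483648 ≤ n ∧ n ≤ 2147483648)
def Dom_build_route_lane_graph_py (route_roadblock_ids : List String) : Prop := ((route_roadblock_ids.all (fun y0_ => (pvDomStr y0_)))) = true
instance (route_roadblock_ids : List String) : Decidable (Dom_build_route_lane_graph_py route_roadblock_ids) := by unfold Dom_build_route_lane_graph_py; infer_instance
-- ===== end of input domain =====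

-- B replaces A's single dict-building pass (setdefault/append) by deduplicating the ids and, per
-- distinct id, filtering the list of adjacent pairs for its successors; objective: alternative.

-- ===== PORT A =====
-- graph.setdefault(rid, []).append(nxt) is exactly Dict.modify rid [] (· ++ [nxt]);
-- the index route_roadblock_ids[idx+1] is read with pyGetD, exact here since the guard keeps it in range.
def build_route_lane_graph_py (route_roadblock_ids : List String) : List (String × List String) :=
  ((PySem.List.enumerate route_roadblock_ids 0).foldl
    (fun g p =>
      if p.1 + 1 < (route_roadblock_ids.length : Int) then
        g.modify p.2 [] (· ++ [PySem.List.pyGetD route_roadblock_ids (p.1 + 1) ""])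
      else
        g.setdefault p.2 [])
    PySem.Dict.empty).items

-- ===== PORT B =====
-- dict.fromkeys = PySem.List.dedup (first occurrences, in order); the comprehension
-- [b for a, b in pairs if a == rid] is the filter-then-map over the zipped adjacent pairs.
def build_route_lane_graph_py_alt (route_roadblock_ids : List String) : List (String × List String) :=
  let pairs := route_roadblock_ids.zip route_roadblock_ids.tail
  (PySem.List.dedup route_roadblock_ids).map
    (fun rid => (rid, (pairs.filter (fun p => p.1 == rid)).map (·.2)))

-- ===== PRECONDITION & SPEC =====
def Spec_build_route_lane_graph_py (route_roadblock_ids : List String) (out : List (String × List String)) : Prop := out = build_route_lane_graph_py_alt route_roadblock_ids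
instance (route_roadblock_ids : List String) (out : List (String × List String)) : Decidable (Spec_build_route_lane_graph_py route_roadblock_ids out) := by unfold Spec_build_route_lane_graph_py; infer_instance

-- ===== CLAIM (what is proved, stated in full; the proofs are below) =====
def Claim_equal_build_route_lane_graph_py : Prop := ∀ (route_roadblock_ids : List String), Dom_build_route_lane_graph_py route_roadblock_ids → Spec_build_route_lane_graph_py route_roadblock_ids (build_route_lane_graph_py route_roadblock_ids)

-- ===== LEMMAS AND PROOFS =====

-- A's loop as simple structural recursion (proof helper, not a port).
def pvA_rec : PySem.Dict String (List String) → List String → PySem.Dict String (List String)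
  | d, [] => d
  | d, [r] => d.setdefault r []
  | d, a :: b :: rest => pvA_rec (d.modify a [] (· ++ [b])) (b :: rest)

lemma pvKeys_insert_add (d : PySem.Dict String (List String)) (k : String) (v : List String) :
    (d.insert k v).keys = PySem.Set.add d.keys k := by
  by_cases h : d.contains k = true
  · rw [PySem.Dict.keys_insert_of_contains d v h,
      PySem.Set.add_of_mem ((PySem.Dict.contains_iff_mem_keys _ _).mp h)]
  · have h' : k ∉ d.keys := fun hm => h ((PySem.Dict.contains_iff_mem_keys _ _).mpr hm)
    rw [PySem.Dict.keys_insert_of_not_contains d v (by simpa using h),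
      PySem.Set.add_of_not_mem h']

lemma pvKeys_setdefault_add (d : PySem.Dict String (List String)) (k : String) (v : List String) :
    (d.setdefault k v).keys = PySem.Set.add d.keys k := by
  rw [PySem.Dict.keys_setdefault]
  by_cases h : d.contains k = true
  · rw [if_pos h, PySem.Set.add_of_mem ((PySem.Dict.contains_iff_mem_keys _ _).mp h)]
  · have h' : k ∉ d.keys := fun hm => h ((PySem.Dict.contains_iff_mem_keys _ _).mpr hm)
    rw [if_neg h, PySem.Set.add_of_not_mem h']

lemma pvA_fold_eq (suf : List String) : ∀ (pre : List String) (d : PySem.Dict String (List String)),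
    (PySem.List.enumerate suf (pre.length : Int)).foldl
      (fun g p =>
        if p.1 + 1 < (((pre ++ suf).length : Nat) : Int) then
          g.modify p.2 [] (· ++ [PySem.List.pyGetD (pre ++ suf) (p.1 + 1) ""])
        else
          g.setdefault p.2 [])
      d
    = pvA_rec d suf := by
  induction suf with
  | nil => intro pre d; simp [PySem.List.enumerate, pvA_rec]
  | cons r suf' ih =>
    intro pre d
    cases suf' with
    | nil =>
      have hguard : ¬ ((pre.length : Int) + 1 < (((pre ++ [r]).length : Nat) : Int)) := by
        simp [List.length_append]
      rw [PySem.List.enumerate_cons, List.foldl_cons, if_neg hguard]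
      simp only [PySem.List.enumerate_nil, List.foldl_nil]
      rfl
    | cons b rest =>
      have hguard : (pre.length : Int) + 1 < (((pre ++ r :: b :: rest).length : Nat) : Int) := by
        push_cast [List.length_append, List.length_cons]; omega
      have hget : PySem.List.pyGetD (pre ++ r :: b :: rest) ((pre.length : Int) + 1) "" = b := by
        have h1 : ((pre.length : Int) + 1) = ((pre.length + 1 : Nat) : Int) := by push_cast; ring
        rw [h1, PySem.List.pyGetD_natCast]
        have h2 : pre ++ r :: b :: rest = (pre ++ [r]) ++ b :: rest := by simp
        rw [h2]
        simp [List.getD, List.length_append]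
      rw [PySem.List.enumerate_cons, List.foldl_cons, if_pos hguard, hget]
      have hpre : pre ++ r :: b :: rest = (pre ++ [r]) ++ (b :: rest) := by simp
      have hlen : (pre.length : Int) + 1 = (((pre ++ [r]).length : Nat) : Int) := by
        simp [List.length_append]
      rw [hpre, hlen, ih (pre ++ [r])]
      simp [pvA_rec]

lemma pvA_rec_getD : ∀ (l : List String) (d : PySem.Dict String (List String)) (k : String),
    (pvA_rec d l).getD k [] =
      d.getD k [] ++ ((l.zip l.tail).filter (fun p => p.1 == k)).map (·.2) := by
  intro l
  induction l with
  | nil => intro d k; simp [pvA_rec]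
  | cons a t ih =>
    intro d k
    cases t with
    | nil =>
      by_cases h : k = a
      · subst h; simp [pvA_rec, PySem.Dict.getD_setdefault_self]
      · simp [pvA_rec, PySem.Dict.getD_eq_get?_getD,
          PySem.Dict.get?_setdefault_of_ne _ ([] : List String) h]
    | cons b rest =>
      simp only [pvA_rec, ih]
      rw [PySem.Dict.getD_modify]
      by_cases h : k = a
      · subst h; simp [List.zip, List.append_assoc]
      · have hba : (a == k) = false := by simp [Ne.symm h]
        simp [h, List.zip, hba]

lemma pvA_rec_keys : ∀ (l : List String) (d : PySem.Dict String (List String)),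
    (pvA_rec d l).keys = PySem.Set.update d.keys l := by
  intro l
  induction l with
  | nil => intro d; simp [pvA_rec, PySem.Set.update_nil]
  | cons a t ih =>
    intro d
    cases t with
    | nil =>
      rw [show pvA_rec d [a] = d.setdefault a [] from rfl, pvKeys_setdefault_add,
        PySem.Set.update_cons, PySem.Set.update_nil]
    | cons b rest =>
      rw [show pvA_rec d (a :: b :: rest) = pvA_rec (d.modify a [] (· ++ [b])) (b :: rest) from rfl,
        ih, PySem.Dict.keys_modify, pvKeys_insert_add]
      simp only [PySem.Set.update_cons]

theorem build_route_lane_graph_py_spec : Claim_equal_build_route_lane_graph_py := by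
  intro ids _
  unfold Spec_build_route_lane_graph_py build_route_lane_graph_py build_route_lane_graph_py_alt
  have hA : (PySem.List.enumerate ids 0).foldl
      (fun g p =>
        if p.1 + 1 < ((ids.length : Nat) : Int) then
          g.modify p.2 [] (· ++ [PySem.List.pyGetD ids (p.1 + 1) ""])
        else
          g.setdefault p.2 [])
      PySem.Dict.empty = pvA_rec PySem.Dict.empty ids := by
    have h := pvA_fold_eq ids [] PySem.Dict.empty
    simpa using h
  rw [hA]
  have hAkeys : (pvA_rec PySem.Dict.empty ids).keys = PySem.Set.ofList ids := by
    rw [pvA_rec_keys]; simp [PySem.Dict.keys_empty, PySem.Set.update_nil_left]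
  have hnodA : (pvA_rec PySem.Dict.empty ids).keys.Nodup := by
    rw [hAkeys]; exact PySem.Set.nodup_ofList ids
  rw [PySem.Dict.items_eq_map_keys _ hnodA ([] : List String), hAkeys]
  simp only [PySem.List.dedup_eq_ofList]
  refine List.map_congr_left (fun k _ => ?_)
  rw [pvA_rec_getD]
  simp [PySem.Dict.getD_empty]

-- ===== VERDICT =====
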